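-- pv_equiv track=rewrite | github.com/naimur009/VRPTW | Model/build_solver_graph.py | add_depot_edges
-- ===== SOURCE A (Python) =====
-- from typing import Dict, List, Tuple, Set
--
-- def add_depot_edges(
--     final_edges: Set[Tuple[int, int]],
--     score_map: Dict[Tuple[int, int], float],
--     customers: List[int],
--     depot_id: int,
-- ) -> int:
--     added = 0
--     for i in customers:
--         if (depot_id, i) in score_map and (depot_id, i) not in final_edges:
--             final_edges.add((depot_id, i))
--             added += 1
--         if (i, depot_id) in score_map and (i, depot_id) not in final_edges:
--             final_edges.add((i, depot_id))
--             added += 1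
--     return added
-- ===== SOURCE B (Python) =====
-- def add_depot_edges(final_edges, score_map, customers, depot_id):
--     cust = set(customers)
--     added = 0
--     for (a, b) in score_map:
--         if ((a == depot_id and b in cust) or (b == depot_id and a in cust)) \
--                 and (a, b) not in final_edges:
--             final_edges.add((a, b))
--             added += 1
--     return added
-- ===== Notes on version B (the rewrite author's own statement) =====
-- stated objective: alternative
-- what changed: Inverts the traversal: instead of looping over customers and probing score_map for both orientations of each depot edge, B loops once over the score_map keys, tests each key for depot-edge shape against a hash set of customers, and adds the missing ones; correctness follows because the added edges are exactly the uniquely-occurring score_map keys of depot shape with a customer endpoint not already in final_edges.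
import Mathlib
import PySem

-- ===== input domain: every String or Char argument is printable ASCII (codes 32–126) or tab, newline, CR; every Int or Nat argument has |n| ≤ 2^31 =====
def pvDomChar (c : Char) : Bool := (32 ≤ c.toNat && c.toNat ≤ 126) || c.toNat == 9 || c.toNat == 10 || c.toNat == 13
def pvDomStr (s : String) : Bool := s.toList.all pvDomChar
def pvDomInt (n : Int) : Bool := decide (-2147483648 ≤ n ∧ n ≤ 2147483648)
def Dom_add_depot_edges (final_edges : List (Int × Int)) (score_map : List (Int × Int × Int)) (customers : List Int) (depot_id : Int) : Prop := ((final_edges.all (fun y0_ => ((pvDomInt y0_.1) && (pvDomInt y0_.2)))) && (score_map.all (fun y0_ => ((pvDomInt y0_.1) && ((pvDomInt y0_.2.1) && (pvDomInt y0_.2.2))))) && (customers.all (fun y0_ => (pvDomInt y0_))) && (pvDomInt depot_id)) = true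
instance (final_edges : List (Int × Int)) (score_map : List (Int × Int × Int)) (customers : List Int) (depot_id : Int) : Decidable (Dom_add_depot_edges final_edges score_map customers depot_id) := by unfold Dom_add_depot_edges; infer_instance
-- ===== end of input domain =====

-- B inverts the traversal: it loops once over the score_map keys and tests each against a hash
-- set of customers, instead of looping over customers and probing score_map (objective: alternative).
-- Both Pythons mutate final_edges in place to the same final set; the equivalence proved here is about the RETURN value.

-- key (a, b) is in score_map (a dict keyed by int pairs)
def pvSmHas (score_map : List (Int × Int × Int)) (a b : Int) : Bool :=
  score_map.any (fun t => t.1 == a && t.2.1 == b)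

-- ===== PORT A =====
def add_depot_edges (final_edges : List (Int × Int)) (score_map : List (Int × Int × Int)) (customers : List Int) (depot_id : Int) : Int :=
  (customers.foldl (fun (st : List (Int × Int) × Int) i =>
      let st := if pvSmHas score_map depot_id i && !(PySem.Set.contains st.1 (depot_id, i)) then
          (PySem.Set.add st.1 (depot_id, i), st.2 + 1) else st
      if pvSmHas score_map i depot_id && !(PySem.Set.contains st.1 (i, depot_id)) then
          (PySem.Set.add st.1 (i, depot_id), st.2 + 1) else st)
    (final_edges, 0)).2

-- ===== PORT B =====
def add_depot_edges_alt (final_edges : List (Int × Int)) (score_map : List (Int × Int × Int)) (customers : List Int) (depot_id : Int) : Int :=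
  let cust := PySem.Set.ofList customers
  -- 'for (a, b) in score_map' iterates the dict's keys: first occurrences, in insertion order
  let keys : List (Int × Int) := PySem.Set.ofList (score_map.map (fun t => (t.1, t.2.1)))
  (keys.foldl (fun (st : List (Int × Int) × Int) k =>
      if ((k.1 == depot_id && PySem.Set.contains cust k.2)
            || (k.2 == depot_id && PySem.Set.contains cust k.1))
          && !(PySem.Set.contains st.1 k) then
        (PySem.Set.add st.1 k, st.2 + 1)
      else st)
    (final_edges, 0)).2

-- ===== PRECONDITION & SPEC =====
def Spec_add_depot_edges (final_edges : List (Int × Int)) (score_map : List (Int × Int × Int)) (customers : List Int) (depot_id : Int) (out : Int) : Prop := out = add_depot_edges_alt final_edges score_map customers depot_id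
instance (final_edges : List (Int × Int)) (score_map : List (Int × Int × Int)) (customers : List Int) (depot_id : Int) (out : Int) : Decidable (Spec_add_depot_edges final_edges score_map customers depot_id out) := by unfold Spec_add_depot_edges; infer_instance

-- ===== CLAIM (what is proved, stated in full; the proofs are below) =====
def Claim_equal_add_depot_edges : Prop := ∀ (final_edges : List (Int × Int)) (score_map : List (Int × Int × Int)) (customers : List Int) (depot_id : Int), Dom_add_depot_edges final_edges score_map customers depot_id → Spec_add_depot_edges final_edges score_map customers depot_id (add_depot_edges final_edges score_map customers depot_id)

-- ===== LEMMAS AND PROOFS =====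

-- one edge-processing step of A's loop body
def pvStepA (score_map : List (Int × Int × Int)) (st : List (Int × Int) × Int) (e : Int × Int) : List (Int × Int) × Int :=
  if pvSmHas score_map e.1 e.2 && !(PySem.Set.contains st.1 e) then
    (PySem.Set.add st.1 e, st.2 + 1) else st

-- one edge accumulated into the abstract candidate set (proof device for A's loop)
def pvStepB (score_map : List (Int × Int × Int)) (c : PySem.Set (Int × Int)) (e : Int × Int) : PySem.Set (Int × Int) :=
  if pvSmHas score_map e.1 e.2 then PySem.Set.add c e else c

-- invariant transfer for one step: A's set stays S0 ∪ candidates, and A's counter moves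
-- exactly as the number of candidates outside S0 does
theorem pvStep_key (score_map : List (Int × Int × Int)) (S0 c : List (Int × Int))
    (st : List (Int × Int) × Int) (e : Int × Int)
    (h : ∀ x, x ∈ st.1 ↔ x ∈ S0 ∨ x ∈ c) :
    (∀ x, x ∈ (pvStepA score_map st e).1 ↔ x ∈ S0 ∨ x ∈ pvStepB score_map c e) ∧
    (pvStepA score_map st e).2 + ((c.filter (fun x => !(PySem.Set.contains S0 x))).length : Int)
      = st.2 + (((pvStepB score_map c e).filter (fun x => !(PySem.Set.contains S0 x))).length : Int) := by
  unfold pvStepA pvStepB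
  by_cases hel : pvSmHas score_map e.1 e.2 = true
  · by_cases he : e ∈ st.1
    · have hco : PySem.Set.contains st.1 e = true := by
        simp [PySem.Set.contains, he]
      simp only [hel, hco, Bool.not_true, Bool.and_false, Bool.false_eq_true, if_false]
      rcases (h e).mp he with hS0 | hc
      · by_cases hec : e ∈ c
        · rw [PySem.Set.add_of_mem hec]; exact ⟨h, rfl⟩
        · rw [PySem.Set.add_of_not_mem hec]
          constructor
          · intro x
            rw [h x]
            constructor
            · rintro (h1 | h2)
              · exact Or.inl h1
              · exact Or.inr (List.mem_append_left _ h2)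
            · rintro (h1 | h2)
              · exact Or.inl h1
              · rcases List.mem_append.mp h2 with h3 | h3
                · exact Or.inr h3
                · simp at h3; subst h3; exact Or.inl hS0
          · simp [List.filter_append, hS0]
      · rw [PySem.Set.add_of_mem hc]; exact ⟨h, rfl⟩
    · have hco : PySem.Set.contains st.1 e = false := by
        simp [PySem.Set.contains, he]
      have heS0 : e ∉ S0 := fun hx => he ((h e).mpr (Or.inl hx))
      have hec : e ∉ c := fun hx => he ((h e).mpr (Or.inr hx))
      simp only [hel, hco, Bool.not_false, Bool.and_true, if_true]
      rw [PySem.Set.add_of_not_mem hec]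
      constructor
      · intro x
        rw [PySem.Set.mem_add, h x]
        constructor
        · rintro ((h1 | h2) | h3)
          · exact Or.inl h1
          · exact Or.inr (List.mem_append_left _ h2)
          · subst h3; exact Or.inr (by simp)
        · rintro (h1 | h2)
          · exact Or.inl (Or.inl h1)
          · rcases List.mem_append.mp h2 with h3 | h3
            · exact Or.inl (Or.inr h3)
            · simp at h3; exact Or.inr h3
      · simp [List.filter_append, heS0]
        omega
  · simp only [Bool.not_eq_true] at hel
    simp [hel, h]

-- A's whole loop: its counter equals the growth of |candidates \ S0| over the customers
theorem pvLoop_key (score_map : List (Int × Int × Int)) (d : Int) :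
    ∀ (cs : List Int) (S0 : List (Int × Int)) (st : List (Int × Int) × Int) (c : List (Int × Int)),
    (∀ x, x ∈ st.1 ↔ x ∈ S0 ∨ x ∈ c) →
    (cs.foldl (fun st i => pvStepA score_map (pvStepA score_map st (d, i)) (i, d)) st).2
      + ((c.filter (fun x => !(PySem.Set.contains S0 x))).length : Int)
    = st.2 + (((cs.foldl (fun c i => pvStepB score_map (pvStepB score_map c (d, i)) (i, d)) c).filter
        (fun x => !(PySem.Set.contains S0 x))).length : Int) := by
  intro cs
  induction cs with
  | nil => intro S0 st c h; simp
  | cons i cs ih =>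
    intro S0 st c h
    simp only [List.foldl_cons]
    obtain ⟨h1, e1⟩ := pvStep_key score_map S0 c st (d, i) h
    obtain ⟨h2, e2⟩ := pvStep_key score_map S0 (pvStepB score_map c (d, i))
      (pvStepA score_map st (d, i)) (i, d) h1
    have e3 := ih S0 (pvStepA score_map (pvStepA score_map st (d, i)) (i, d))
      (pvStepB score_map (pvStepB score_map c (d, i)) (i, d)) h2
    omega

-- contains is false exactly off the set
theorem pvContains_false_iff {α : Type} [BEq α] [LawfulBEq α] (s : PySem.Set α) (x : α) :
    PySem.Set.contains s x = false ↔ x ∉ s := by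
  constructor
  · intro h hm
    rw [(PySem.Set.contains_iff s x).mpr hm] at h
    cases h
  · intro h
    cases hc : PySem.Set.contains s x
    · rfl
    · exact absurd ((PySem.Set.contains_iff s x).mp hc) h

-- membership through one pvStepB step
theorem pvStepB_mem (score_map : List (Int × Int × Int)) (c : PySem.Set (Int × Int))
    (e x : Int × Int) :
    x ∈ pvStepB score_map c e ↔ x ∈ c ∨ (x = e ∧ pvSmHas score_map e.1 e.2 = true) := by
  unfold pvStepB
  split_ifs with h
  · rw [PySem.Set.mem_add]; tauto
  · constructor
    · exact Or.inl
    · rintro (hx | ⟨rfl, hh⟩)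
      · exact hx
      · exact absurd hh h

-- pvStepB preserves duplicate-freeness
theorem pvStepB_nodup (score_map : List (Int × Int × Int)) (c : PySem.Set (Int × Int))
    (e : Int × Int) (h : c.Nodup) : (pvStepB score_map c e).Nodup := by
  unfold pvStepB
  split_ifs
  · exact PySem.Set.nodup_add _ _ h
  · exact h

-- the candidate set accumulated by pvStepB stays duplicate-free
theorem pvCand_nodup (score_map : List (Int × Int × Int)) (d : Int) :
    ∀ (cs : List Int) (c : List (Int × Int)), c.Nodup →
    (cs.foldl (fun c i => pvStepB score_map (pvStepB score_map c (d, i)) (i, d)) c).Nodup := by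
  intro cs
  induction cs with
  | nil => intro c h; simpa using h
  | cons i cs ih =>
    intro c h
    simp only [List.foldl_cons]
    exact ih _ (pvStepB_nodup _ _ _ (pvStepB_nodup _ _ _ h))

-- membership in the accumulated candidate set
theorem pvCand_mem (score_map : List (Int × Int × Int)) (d : Int) :
    ∀ (cs : List Int) (c : List (Int × Int)) (x : Int × Int),
    x ∈ cs.foldl (fun c i => pvStepB score_map (pvStepB score_map c (d, i)) (i, d)) c ↔
      x ∈ c ∨ ∃ i ∈ cs, (x = (d, i) ∧ pvSmHas score_map d i = true) ∨
                         (x = (i, d) ∧ pvSmHas score_map i d = true) := by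
  intro cs
  induction cs with
  | nil => intro c x; simp
  | cons i cs ih =>
    intro c x
    simp only [List.foldl_cons, ih, pvStepB_mem, List.mem_cons]
    constructor
    · rintro (((hx | ⟨rfl, hh⟩) | ⟨rfl, hh⟩) | ⟨j, hj, hc⟩)
      · exact Or.inl hx
      · exact Or.inr ⟨i, Or.inl rfl, Or.inl ⟨rfl, hh⟩⟩
      · exact Or.inr ⟨i, Or.inl rfl, Or.inr ⟨rfl, hh⟩⟩
      · exact Or.inr ⟨j, Or.inr hj, hc⟩
    · rintro (hx | ⟨j, hj | hj, hc⟩)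
      · exact Or.inl (Or.inl (Or.inl hx))
      · subst hj
        rcases hc with ⟨rfl, hh⟩ | ⟨rfl, hh⟩
        · exact Or.inl (Or.inl (Or.inr ⟨rfl, hh⟩))
        · exact Or.inl (Or.inr ⟨rfl, hh⟩)
      · exact Or.inr ⟨j, hj, hc⟩

-- B's loop: on a duplicate-free key list, the counter counts the keys that pass the test and are new
theorem pvBLoop (p : Int × Int → Bool) :
    ∀ (keys : List (Int × Int)) (S : List (Int × Int)) (acc : Int), keys.Nodup →
    (keys.foldl (fun (st : List (Int × Int) × Int) k =>
        if p k && !(PySem.Set.contains st.1 k) then (PySem.Set.add st.1 k, st.2 + 1) else st)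
      (S, acc)).2
    = acc + ((keys.filter (fun k => p k && !(PySem.Set.contains S k))).length : Int) := by
  intro keys
  induction keys with
  | nil => intro S acc _; simp
  | cons k rest ih =>
    intro S acc hnd
    have hk : k ∉ rest := (List.nodup_cons.mp hnd).1
    have hnd' : rest.Nodup := (List.nodup_cons.mp hnd).2
    simp only [List.foldl_cons]
    by_cases hp : (p k && !(PySem.Set.contains S k)) = true
    · rw [if_pos hp, ih _ _ hnd']
      have hcong : rest.filter (fun k' => p k' && !(PySem.Set.contains (PySem.Set.add S k) k'))
          = rest.filter (fun k' => p k' && !(PySem.Set.contains S k')) := by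
        apply List.filter_congr
        intro x hx
        have hxk : x ≠ k := fun h => hk (h ▸ hx)
        have hsame : PySem.Set.contains (PySem.Set.add S k) x = PySem.Set.contains S x := by
          by_cases hxs : x ∈ S
          · rw [(PySem.Set.contains_iff _ x).mpr ((PySem.Set.mem_add S k x).mpr (Or.inl hxs)),
                (PySem.Set.contains_iff S x).mpr hxs]
          · have h1 : x ∉ PySem.Set.add S k := fun hmem =>
              ((PySem.Set.mem_add S k x).mp hmem).elim hxs hxk
            rw [(pvContains_false_iff _ x).mpr h1, (pvContains_false_iff S x).mpr hxs]
        rw [hsame]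
      rw [hcong, List.filter_cons, if_pos hp]
      simp only [List.length_cons]
      push_cast
      omega
    · rw [if_neg hp, ih _ _ hnd', List.filter_cons, if_neg hp]

-- x is a key of score_map iff pvSmHas holds of its components
theorem pvKeys_mem (score_map : List (Int × Int × Int)) (x : Int × Int) :
    x ∈ PySem.Set.ofList (score_map.map (fun t => (t.1, t.2.1))) ↔
      pvSmHas score_map x.1 x.2 = true := by
  rw [PySem.Set.mem_ofList, List.mem_map]
  unfold pvSmHas
  rw [List.any_eq_true]
  constructor
  · rintro ⟨t, ht, rfl⟩; exact ⟨t, ht, by simp⟩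
  · rintro ⟨t, ht, hb⟩
    refine ⟨t, ht, ?_⟩
    simp only [Bool.and_eq_true, beq_iff_eq] at hb
    cases x; simp_all

-- ===== VERDICT (by name: the statement is the Claim_ definition above) =====
theorem add_depot_edges_spec : Claim_equal_add_depot_edges := by
  intro final_edges score_map customers depot_id _
  unfold Spec_add_depot_edges
  -- A's value: |candidates \ final_edges|
  have hA : add_depot_edges final_edges score_map customers depot_id
      = (((customers.foldl (fun c i => pvStepB score_map (pvStepB score_map c (depot_id, i)) (i, depot_id))
          ([] : List (Int × Int))).filter (fun x => !(PySem.Set.contains final_edges x))).length : Int) := by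
    have h0 : ∀ x : Int × Int, x ∈ final_edges ↔ x ∈ final_edges ∨ x ∈ ([] : List (Int × Int)) := by simp
    have hkey := pvLoop_key score_map depot_id customers final_edges (final_edges, (0 : Int)) [] h0
    have hA0 : add_depot_edges final_edges score_map customers depot_id
        = (customers.foldl (fun st i => pvStepA score_map (pvStepA score_map st (depot_id, i)) (i, depot_id))
            (final_edges, (0 : Int))).2 := rfl
    rw [hA0]; simpa using hkey
  -- B's value: |{k ∈ keys : depot shape with customer endpoint, k ∉ final_edges}|
  have hB : add_depot_edges_alt final_edges score_map customers depot_id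
      = (((PySem.Set.ofList (score_map.map (fun t => (t.1, t.2.1)))).filter
          (fun k => ((k.1 == depot_id && PySem.Set.contains (PySem.Set.ofList customers) k.2)
              || (k.2 == depot_id && PySem.Set.contains (PySem.Set.ofList customers) k.1))
            && !(PySem.Set.contains final_edges k))).length : Int) := by
    have hkey := pvBLoop
      (fun k => (k.1 == depot_id && PySem.Set.contains (PySem.Set.ofList customers) k.2)
              || (k.2 == depot_id && PySem.Set.contains (PySem.Set.ofList customers) k.1))
      (PySem.Set.ofList (score_map.map (fun t => (t.1, t.2.1)))) final_edges 0
      (PySem.Set.nodup_ofList _)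
    have hB0 : add_depot_edges_alt final_edges score_map customers depot_id
        = ((PySem.Set.ofList (score_map.map (fun t => (t.1, t.2.1)))).foldl
            (fun (st : List (Int × Int) × Int) k =>
              if ((k.1 == depot_id && PySem.Set.contains (PySem.Set.ofList customers) k.2)
                  || (k.2 == depot_id && PySem.Set.contains (PySem.Set.ofList customers) k.1))
                  && !(PySem.Set.contains st.1 k) then (PySem.Set.add st.1 k, st.2 + 1) else st)
            (final_edges, (0 : Int))).2 := rfl
    rw [hB0, hkey]
    simp
  rw [hA, hB]
  -- both are lengths of Nodup lists with the same members, hence of a Perm pair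
  congr 1
  apply List.Perm.length_eq
  rw [List.perm_ext_iff_of_nodup
      (List.Nodup.filter _ (pvCand_nodup score_map depot_id customers [] (by simp)))
      (List.Nodup.filter _ (PySem.Set.nodup_ofList _))]
  intro x
  rw [List.mem_filter, List.mem_filter, pvCand_mem, pvKeys_mem]
  simp only [Bool.and_eq_true, Bool.or_eq_true, Bool.not_eq_eq_eq_not, Bool.not_true,
    beq_iff_eq, pvContains_false_iff]
  constructor
  · rintro ⟨hmem, hnf⟩
    rcases hmem with h | ⟨i, hi, ⟨rfl, hh⟩ | ⟨rfl, hh⟩⟩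
    · simp at h
    · exact ⟨hh, Or.inl ⟨rfl, (PySem.Set.contains_iff _ _).mpr ((PySem.Set.mem_ofList _ _).mpr hi)⟩, hnf⟩
    · exact ⟨hh, Or.inr ⟨rfl, (PySem.Set.contains_iff _ _).mpr ((PySem.Set.mem_ofList _ _).mpr hi)⟩, hnf⟩
  · rintro ⟨hh, hshape, hnf⟩
    refine ⟨Or.inr ?_, hnf⟩
    rcases hshape with ⟨h1, h2⟩ | ⟨h1, h2⟩
    · exact ⟨x.2, (PySem.Set.mem_ofList _ _).mp ((PySem.Set.contains_iff _ _).mp h2),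
        Or.inl ⟨by cases x; simp_all, by cases x; simp_all⟩⟩
    · exact ⟨x.1, (PySem.Set.mem_ofList _ _).mp ((PySem.Set.contains_iff _ _).mp h2),
        Or.inr ⟨by cases x; simp_all, by cases x; simp_all⟩⟩
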